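-- pv_equiv track=rewrite | github.com/sunnie1239/py_stock | stock.py | three_days2
-- ===== SOURCE A (Python) =====
-- def three_days2(data): # 此作法執行效率較慢
--
--     result = []
--
--     for i in range(len(data)):
--         if i < 3:
--             result.append(0)
--         else:
--             if data[i-3] < data[i-2] < data[i-1] < data[i]:
--                 result.append(1) # 連三漲
--             elif data[i-3] > data[i-2] > data[i-1] > data[i]:
--                 result.append(-1) # 連三跌
--             else:
--                 result.append(0) # 其他
--
--     return result
-- ===== SOURCE B (Python) =====
-- def three_days2(data):
--     # One linear pass with streak counters instead of re-reading a 4-element window.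
--     result = []
--     up = 0
--     down = 0
--     prev = None
--     for x in data:
--         if prev is None:
--             result.append(0)
--         else:
--             if x > prev:
--                 up += 1
--                 down = 0
--             elif x < prev:
--                 down += 1
--                 up = 0
--             else:
--                 up = 0
--                 down = 0
--             result.append(1 if up >= 3 else (-1 if down >= 3 else 0))
--         prev = x
--     return result
-- ===== Notes on version B (the rewrite author's own statement) =====
-- stated objective: faster
-- what changed: B replaces A's per-index re-reading of a 4-element window (three indexed chained comparisons each iteration) by a single pass over the elements that maintains incremental up/down streak counters.
import Mathlib
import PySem

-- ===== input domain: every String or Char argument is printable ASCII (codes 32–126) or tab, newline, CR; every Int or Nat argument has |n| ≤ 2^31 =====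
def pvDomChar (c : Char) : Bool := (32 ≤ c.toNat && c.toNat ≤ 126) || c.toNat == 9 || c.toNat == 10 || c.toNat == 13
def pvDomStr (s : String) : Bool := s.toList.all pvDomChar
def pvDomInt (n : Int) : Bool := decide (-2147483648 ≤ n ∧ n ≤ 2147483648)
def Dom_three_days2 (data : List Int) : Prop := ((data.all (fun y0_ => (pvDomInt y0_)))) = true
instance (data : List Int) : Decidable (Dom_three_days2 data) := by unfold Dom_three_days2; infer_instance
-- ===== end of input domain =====

-- B maintains incremental up/down streak counters in one pass instead of re-reading a 4-element window per index (alternative decomposition, same behaviour).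

-- ===== PORT A =====
-- loop body of A: append 0 for i < 3, else one of the two chained window comparisons.
-- Indices i-3 .. i are always in range (3 ≤ i < len(data)), so the pyGetD default 0 is never consulted.

def aStep (data : List Int) (i : Int) : Int :=
  if i < 3 then 0
  else
    if PySem.List.pyGetD data (i-3) 0 < PySem.List.pyGetD data (i-2) 0 ∧
       PySem.List.pyGetD data (i-2) 0 < PySem.List.pyGetD data (i-1) 0 ∧
       PySem.List.pyGetD data (i-1) 0 < PySem.List.pyGetD data i 0 then 1
    else if PySem.List.pyGetD data (i-2) 0 < PySem.List.pyGetD data (i-3) 0 ∧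
            PySem.List.pyGetD data (i-1) 0 < PySem.List.pyGetD data (i-2) 0 ∧
            PySem.List.pyGetD data i 0 < PySem.List.pyGetD data (i-1) 0 then -1
    else 0

def three_days2 (data : List Int) : List Int :=
  (PySem.List.pyRange 0 (data.length : Int) 1).foldl (fun acc i => acc ++ [aStep data i]) []

-- ===== PORT B =====
-- loop of Source B after the first element: prev = previous element, up/down = current streak counters.

def bGo : Int → Int → Int → List Int → List Int
  | _, _, _, [] => []
  | prev, up, down, x :: rest =>
      let ud : Int × Int :=
        if prev < x then (up + 1, 0)
        else if x < prev then (0, down + 1)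
        else (0, 0)
      (if 3 ≤ ud.1 then 1 else if 3 ≤ ud.2 then -1 else 0) :: bGo x ud.1 ud.2 rest

def three_days2_alt (data : List Int) : List Int :=
  match data with
  | [] => []
  | x :: rest => 0 :: bGo x 0 0 rest

-- ===== PRECONDITION & SPEC =====
def Spec_three_days2 (data : List Int) (out : List Int) : Prop := out = three_days2_alt data
instance (data : List Int) (out : List Int) : Decidable (Spec_three_days2 data out) := by unfold Spec_three_days2; infer_instance

-- ===== CLAIM (what is proved, stated in full; the proofs are below) =====
def Claim_equal_three_days2 : Prop := ∀ (data : List Int), Dom_three_days2 data → Spec_three_days2 data (three_days2 data)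

-- ===== LEMMAS AND PROOFS =====
-- proof-only common characterization of both ports: leading zeros then one value per sliding 4-window

def g (a b c d : Int) : Int :=
  if a < b ∧ b < c ∧ c < d then 1 else if b < a ∧ c < b ∧ d < c then -1 else 0

def win : List Int → List Int
  | a :: b :: c :: d :: t => g a b c d :: win (b :: c :: d :: t)
  | _ => []
termination_by l => l.length

def spec (data : List Int) : List Int :=
  List.replicate (min data.length 3) 0 ++ win data

lemma win_length : ∀ (l : List Int), (win l).length = l.length - 3
  | a :: b :: c :: d :: t => by
      have := win_length (b :: c :: d :: t)
      simp [win, this]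
  | [] => by simp [win]
  | [a] => by simp [win]
  | [a, b] => by simp [win]
  | [a, b, c] => by simp [win]
termination_by l => l.length

lemma win_get (l : List Int) (j : Nat) (h : j + 3 < l.length) :
    (win l)[j]'(by rw [win_length]; omega) = g (l[j]'(by omega)) (l[j+1]'(by omega)) (l[j+2]'(by omega)) (l[j+3]'(by omega)) := by
  induction j generalizing l with
  | zero =>
    match l, h with
    | a :: b :: c :: d :: t, _ => simp [win]
  | succ j ih =>
    match l, h with
    | a :: b :: c :: d :: t, h =>
      have := ih (b :: c :: d :: t) (by simp at h ⊢; omega)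
      simp [win] at this ⊢
      exact this

lemma pyGetD_nat (l : List Int) (k : Nat) (h : k < l.length) :
    PySem.List.pyGetD l (k : Int) 0 = l[k]'h := by
  rw [PySem.List.pyGetD_natCast]
  exact List.getD_eq_getElem l 0 h

lemma a_eq_spec (data : List Int) : three_days2 data = spec data := by
  have hmap : three_days2 data = (PySem.List.pyRange 0 (data.length : Int) 1).map (aStep data) := by
    rw [three_days2, PySem.List.foldl_append_singleton_eq_map, List.nil_append]
  rw [hmap]
  apply List.ext_getElem
  · simp [PySem.List.length_pyRange_one, spec, win_length]
    omega
  · intro i h1 h2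
    have hi : i < data.length := by
      simpa [PySem.List.length_pyRange_one] using h1
    rw [List.getElem_map]
    rw [PySem.List.getElem_pyRange_one]
    by_cases h3 : i < 3
    · have : (0 + (i : Int)) < 3 := by omega
      rw [aStep, if_pos this]
      simp only [spec]
      rw [List.getElem_append_left (by simp; omega)]
      simp
    · have hnl : ¬ (0 + (i : Int)) < 3 := by omega
      have hmin : min data.length 3 = 3 := by omega
      rw [aStep, if_neg hnl]
      simp only [spec]
      rw [List.getElem_append_right (by simp; omega)]
      have hw := win_get data (i - 3) (by omega)
      have e3 : (0 + (i:Int)) - 3 = ((i-3 : Nat) : Int) := by omega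
      have e2 : (0 + (i:Int)) - 2 = ((i-2 : Nat) : Int) := by omega
      have e1 : (0 + (i:Int)) - 1 = ((i-1 : Nat) : Int) := by omega
      have e0 : (0 + (i:Int)) = ((i : Nat) : Int) := by omega
      rw [e3, e2, e1, e0]
      rw [pyGetD_nat data (i-3) (by omega), pyGetD_nat data (i-2) (by omega),
          pyGetD_nat data (i-1) (by omega), pyGetD_nat data i hi]
      rw [show data[i-3+1]'(by omega) = data[i-2]'(by omega) from by congr 1; omega,
          show data[i-3+2]'(by omega) = data[i-1]'(by omega) from by congr 1; omega,
          show data[i-3+3]'(by omega) = data[i]'hi from by congr 1; omega] at hw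
      simp only [List.length_replicate, hmin]
      rw [hw]
      simp [g]

lemma bGo_eq_win (t : List Int) : ∀ (a b c up down : Int),
    0 ≤ up → 0 ≤ down →
    (1 ≤ up ↔ b < c) → (2 ≤ up ↔ a < b ∧ b < c) →
    (1 ≤ down ↔ c < b) → (2 ≤ down ↔ b < a ∧ c < b) →
    bGo c up down t = win (a :: b :: c :: t) := by
  induction t with
  | nil => intros; simp [bGo, win]
  | cons x rest ih =>
    intro a b c up down hu0 hd0 hu1 hu2 hd1 hd2
    simp only [bGo, win]
    rcases lt_trichotomy c x with h | h | h
    · simp only [if_pos h]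
      rw [List.cons_eq_cons]
      constructor
      · simp only [g]
        have : (3 ≤ up + 1) ↔ (a < b ∧ b < c ∧ c < x) := by
          constructor
          · intro hh; exact ⟨(hu2.mp (by omega)).1, (hu2.mp (by omega)).2, h⟩
          · intro hh; have := hu2.mpr ⟨hh.1, hh.2.1⟩; omega
        rcases Decidable.em (a < b ∧ b < c ∧ c < x) with hc | hc
        · simp [hc, this.mpr hc]
        · have h1 : ¬ (3 ≤ up + 1) := fun hh => hc (this.mp hh)
          have h2 : ¬ (b < a ∧ c < b ∧ x < c) := by rintro ⟨_,_,hh⟩; omega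
          simp [hc, h1, h2]
      · exact ih b c x (up + 1) 0 (by omega) le_rfl
          (by constructor <;> intro <;> [exact h; omega])
          (by constructor
              · intro hh; exact ⟨hu1.mp (by omega), h⟩
              · rintro ⟨hh, _⟩; have := hu1.mpr hh; omega)
          (by constructor <;> intro hh <;> omega)
          (by constructor
              · intro hh; omega
              · rintro ⟨_, hh⟩; omega)
    · subst h
      simp only [lt_irrefl, if_false]
      norm_num
      constructor
      · simp [g]
      · exact ih b c c 0 0 le_rfl le_rfl
          (by constructor <;> intro hh <;> [omega; exact absurd hh (lt_irrefl c)])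
          (by constructor
              · intro hh; omega
              · rintro ⟨_, hh⟩; exact absurd hh (lt_irrefl c))
          (by constructor <;> intro hh <;> [omega; exact absurd hh (lt_irrefl c)])
          (by constructor
              · intro hh; omega
              · rintro ⟨_, hh⟩; exact absurd hh (lt_irrefl c))
    · have hnx : ¬ c < x := by omega
      simp only [if_neg hnx, if_pos h]
      rw [List.cons_eq_cons]
      constructor
      · simp only [g]
        have h1 : ¬ (a < b ∧ b < c ∧ c < x) := by rintro ⟨_,_,hh⟩; omega
        have : (3 ≤ down + 1) ↔ (b < a ∧ c < b ∧ x < c) := by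
          constructor
          · intro hh; exact ⟨(hd2.mp (by omega)).1, (hd2.mp (by omega)).2, h⟩
          · intro hh; have := hd2.mpr ⟨hh.1, hh.2.1⟩; omega
        rcases Decidable.em (b < a ∧ c < b ∧ x < c) with hc | hc
        · simp [h1, hc, this.mpr hc]
        · have h2 : ¬ (3 ≤ down + 1) := fun hh => hc (this.mp hh)
          simp [h1, hc, h2]
      · exact ih b c x 0 (down + 1) le_rfl (by omega)
          (by constructor <;> intro hh <;> omega)
          (by constructor
              · intro hh; omega
              · rintro ⟨_, hh⟩; omega)
          (by constructor <;> intro <;> [exact h; omega])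
          (by constructor
              · intro hh; exact ⟨hd1.mp (by omega), h⟩
              · rintro ⟨hh, _⟩; have := hd1.mpr hh; omega)

lemma bGo_two (x y z : Int) (rest : List Int) :
    bGo x 0 0 (y :: z :: rest) = 0 :: 0 :: win (x :: y :: z :: rest) := by
  rcases lt_trichotomy x y with h1 | h1 | h1 <;> rcases lt_trichotomy y z with h2 | h2 | h2
  · have e : bGo x 0 0 (y :: z :: rest) = 0 :: 0 :: bGo z 2 0 rest := by
      simp [bGo, h1, h2]
    rw [e, bGo_eq_win rest x y z 2 0 (by omega) (by omega) (by omega) (by omega) (by omega) (by omega)]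
  · have e : bGo x 0 0 (y :: z :: rest) = 0 :: 0 :: bGo z 0 0 rest := by
      simp [bGo, h2, show x < z from h2 ▸ h1]
    rw [e, bGo_eq_win rest x y z 0 0 (by omega) (by omega) (by omega) (by omega) (by omega) (by omega)]
  · have e : bGo x 0 0 (y :: z :: rest) = 0 :: 0 :: bGo z 0 1 rest := by
      simp [bGo, h1, h2, lt_asymm h2]
    rw [e, bGo_eq_win rest x y z 0 1 (by omega) (by omega) (by omega) (by omega) (by omega) (by omega)]
  · have e : bGo x 0 0 (y :: z :: rest) = 0 :: 0 :: bGo z 1 0 rest := by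
      simp [bGo, h1, h2]
    rw [e, bGo_eq_win rest x y z 1 0 (by omega) (by omega) (by omega) (by omega) (by omega) (by omega)]
  · have e : bGo x 0 0 (y :: z :: rest) = 0 :: 0 :: bGo z 0 0 rest := by
      simp [bGo, h1, h2]
    rw [e, bGo_eq_win rest x y z 0 0 (by omega) (by omega) (by omega) (by omega) (by omega) (by omega)]
  · have e : bGo x 0 0 (y :: z :: rest) = 0 :: 0 :: bGo z 0 1 rest := by
      simp [bGo, h1, h2, lt_asymm h2]
    rw [e, bGo_eq_win rest x y z 0 1 (by omega) (by omega) (by omega) (by omega) (by omega) (by omega)]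
  · have e : bGo x 0 0 (y :: z :: rest) = 0 :: 0 :: bGo z 1 0 rest := by
      simp [bGo, h1, h2, lt_asymm h1]
    rw [e, bGo_eq_win rest x y z 1 0 (by omega) (by omega) (by omega) (by omega) (by omega) (by omega)]
  · have e : bGo x 0 0 (y :: z :: rest) = 0 :: 0 :: bGo z 0 0 rest := by
      simp [bGo, h2, show z < x from h2 ▸ h1, show ¬ x < z from by omega]
    rw [e, bGo_eq_win rest x y z 0 0 (by omega) (by omega) (by omega) (by omega) (by omega) (by omega)]
  · have e : bGo x 0 0 (y :: z :: rest) = 0 :: 0 :: bGo z 0 2 rest := by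
      simp [bGo, h1, h2, lt_asymm h1, lt_asymm h2]
    rw [e, bGo_eq_win rest x y z 0 2 (by omega) (by omega) (by omega) (by omega) (by omega) (by omega)]

lemma b_eq_spec (data : List Int) : three_days2_alt data = spec data := by
  match data with
  | [] => simp [three_days2_alt, spec, win]
  | [x] => simp [three_days2_alt, spec, bGo, win]
  | [x, y] =>
    rcases lt_trichotomy x y with h | h | h <;>
      simp [three_days2_alt, spec, bGo, win, h, lt_asymm]
  | x :: y :: z :: rest =>
    have h3 : min (x :: y :: z :: rest).length 3 = 3 := by simp
    simp only [three_days2_alt, spec, h3, bGo_two]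
    rfl

-- ===== VERDICT (by name: the statement is the Claim_ definition above) =====
theorem three_days2_spec : Claim_equal_three_days2 := by
  intro data _
  unfold Spec_three_days2
  rw [a_eq_spec, b_eq_spec]
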